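-- pv_equiv track=rewrite | github.com/LiaoChinTe/netsquid-simulation | QToken/QToken_Alice.py | CutNonPair
-- ===== SOURCE A (Python) =====
-- def CutNonPair(myList,minBound,maxBound):
--     for i in range(minBound,maxBound+1):
--         if minBound==1 and i in myList:
--             if i+1 in myList and i%2==1:
--                 pass
--             elif i-1 in myList and i%2==0:
--                 pass
--             else:
--                 myList.remove(i)
--         elif minBound==0 and i in myList:
--             if i+1 in myList and i%2==0:
--                 pass
--             elif i-1 in myList and i%2==1:
--                 pass
--             else:
--                 myList.remove(i)
--     return myList
-- ===== SOURCE B (Python) =====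
-- def CutNonPair(myList, minBound, maxBound):
--     # One pass over the ELEMENTS (not the integer range); mutates myList in place like A does.
--     if minBound != 0 and minBound != 1:
--         return myList
--     present = set(myList)
--     removed = set()
--     result = []
--     for x in myList:
--         partner = x + 1 if x % 2 == minBound else x - 1
--         if minBound <= x <= maxBound and partner not in present and x not in removed:
--             removed.add(x)
--         else:
--             result.append(x)
--     myList[:] = result
--     return myList
-- ===== Notes on version B (the rewrite author's own statement) =====
-- stated objective: alternative
-- what changed: B replaces A's scan of the whole integer range [minBound, maxBound] with repeated 'in'/'remove' list scans by a single pass over the list's elements using a precomputed presence set and a removed-tracking set, writing the kept elements back in one splice.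
import Mathlib
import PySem

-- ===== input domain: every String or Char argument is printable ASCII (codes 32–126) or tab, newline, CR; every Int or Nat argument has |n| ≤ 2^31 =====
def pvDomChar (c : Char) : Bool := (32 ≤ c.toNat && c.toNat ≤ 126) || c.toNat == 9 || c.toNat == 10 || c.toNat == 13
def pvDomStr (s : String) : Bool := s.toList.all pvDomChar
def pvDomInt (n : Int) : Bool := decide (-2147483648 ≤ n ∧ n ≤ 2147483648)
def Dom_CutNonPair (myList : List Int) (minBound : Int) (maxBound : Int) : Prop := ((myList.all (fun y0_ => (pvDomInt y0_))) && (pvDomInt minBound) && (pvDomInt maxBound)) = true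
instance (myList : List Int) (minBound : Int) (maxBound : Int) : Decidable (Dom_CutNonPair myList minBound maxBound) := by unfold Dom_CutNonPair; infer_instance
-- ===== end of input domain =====

-- B replaces A's scan of the whole integer range (with repeated membership scans) by one pass
-- over the list's elements with a precomputed presence set (alternative algorithm, same measured
-- cost); both Pythons mutate myList in place identically; the equivalence is about the return value.

-- ===== PORT A =====
-- myList.remove(i): Python raises ValueError when i is absent; in A every call is guarded by
-- 'i in myList', so the getD fallback is never taken.
def pyRemove (l : List Int) (x : Int) : List Int := (PySem.List.remove? l x).getD l

def CutNonPair (myList : List Int) (minBound : Int) (maxBound : Int) : List Int :=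
  (PySem.List.pyRange minBound (maxBound + 1) 1).foldl (fun l i =>
    if minBound == 1 && l.contains i then
      if l.contains (i + 1) && (PySem.Int.mod i 2 == 1) then l
      else if l.contains (i - 1) && (PySem.Int.mod i 2 == 0) then l
      else pyRemove l i
    else if minBound == 0 && l.contains i then
      if l.contains (i + 1) && (PySem.Int.mod i 2 == 0) then l
      else if l.contains (i - 1) && (PySem.Int.mod i 2 == 1) then l
      else pyRemove l i
    else l) myList

-- ===== PORT B =====
def CutNonPair_alt (myList : List Int) (minBound : Int) (maxBound : Int) : List Int :=
  if minBound ≠ 0 ∧ minBound ≠ 1 then myList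
  else
    let present : PySem.Set Int := PySem.Set.ofList myList
    let r := myList.foldl (fun (st : List Int × PySem.Set Int) x =>
      let partner := if PySem.Int.mod x 2 == minBound then x + 1 else x - 1
      if decide (minBound ≤ x ∧ x ≤ maxBound) && !(PySem.Set.contains present partner)
           && !(PySem.Set.contains st.2 x)
      then (st.1, PySem.Set.add st.2 x)
      else (st.1 ++ [x], st.2)) ([], PySem.Set.empty)
    r.1

-- ===== PRECONDITION & SPEC =====
def Spec_CutNonPair (myList : List Int) (minBound : Int) (maxBound : Int) (out : List Int) : Prop := out = CutNonPair_alt myList minBound maxBound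
instance (myList : List Int) (minBound : Int) (maxBound : Int) (out : List Int) : Decidable (Spec_CutNonPair myList minBound maxBound out) := by unfold Spec_CutNonPair; infer_instance

-- ===== CLAIM (what is proved, stated in full; the proofs are below) =====
def Claim_equal_CutNonPair : Prop := ∀ (myList : List Int) (minBound : Int) (maxBound : Int), Dom_CutNonPair myList minBound maxBound → Spec_CutNonPair myList minBound maxBound (CutNonPair myList minBound maxBound)

-- ===== LEMMAS AND PROOFS =====

-- the partner of x under a given parity base mn
def pPartner (mn x : Int) : Int := if PySem.Int.mod x 2 == mn then x + 1 else x - 1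

-- "x gets removed": in range and its partner is absent from the ORIGINAL list
def pBad (L0 : List Int) (mn mx x : Int) : Bool :=
  decide (mn ≤ x ∧ x ≤ mx) && !(L0.contains (pPartner mn x))

-- remove the first occurrence of every value satisfying p (later duplicates are kept)
def eraseFirsts (p : Int → Bool) : List Int → List Int
  | [] => []
  | x :: xs => if p x then eraseFirsts (fun y => p y && !(y == x)) xs else x :: eraseFirsts p xs

theorem eraseFirsts_cons_pos (p : Int → Bool) (x : Int) (xs : List Int) (h : p x = true) :
    eraseFirsts p (x :: xs) = eraseFirsts (fun y => p y && !(y == x)) xs := by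
  simp [eraseFirsts, h]

theorem eraseFirsts_cons_neg (p : Int → Bool) (x : Int) (xs : List Int) (h : p x = false) :
    eraseFirsts p (x :: xs) = x :: eraseFirsts p xs := by
  simp [eraseFirsts, h]

theorem eraseFirsts_congr (p q : Int → Bool) (h : ∀ y, p y = q y) (l : List Int) :
    eraseFirsts p l = eraseFirsts q l := by
  have : p = q := funext h
  subst this; rfl

theorem foldl_erase_nil (V : List Int) : V.foldl (fun l v => l.erase v) ([] : List Int) = [] := by
  induction V with
  | nil => rfl
  | cons v V ih => simpa using ih

theorem foldl_erase_cons_not_mem (V : List Int) (x : Int) (xs : List Int) (hx : x ∉ V) :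
    V.foldl (fun l v => l.erase v) (x :: xs) = x :: V.foldl (fun l v => l.erase v) xs := by
  induction V generalizing xs with
  | nil => rfl
  | cons v V ih =>
    have hvx : v ≠ x := by rintro rfl; exact hx (List.mem_cons_self ..)
    have h1 : (x :: xs).erase v = x :: xs.erase v := by
      rw [List.erase_cons_tail]; simp [hvx.symm]
    simp only [List.foldl_cons, h1]
    exact ih (xs.erase v) (fun h => hx (List.mem_cons_of_mem _ h))

theorem foldl_erase_cons_mem (V : List Int) (x : Int) (xs : List Int) (hx : x ∈ V) :
    V.foldl (fun l v => l.erase v) (x :: xs) = (V.erase x).foldl (fun l v => l.erase v) xs := by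
  induction V generalizing xs with
  | nil => cases hx
  | cons v V ih =>
    by_cases hvx : v = x
    · subst hvx
      simp [List.erase_cons_head]
    · have hxV : x ∈ V := by cases hx with
        | head => exact absurd rfl hvx
        | tail _ h => exact h
      have hxv : x ≠ v := fun h => hvx h.symm
      have h1 : (x :: xs).erase v = x :: xs.erase v := by
        rw [List.erase_cons_tail]; simp [hxv]
      have h2 : (v :: V).erase x = v :: V.erase x := by
        rw [List.erase_cons_tail]; simp [hvx]
      simp only [List.foldl_cons, h1, h2]
      exact ih (xs.erase v) hxV

-- erasing each member of a duplicate-free list V = dropping the first occurrence of each V-value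
theorem foldl_erase_eq_eraseFirsts (l V : List Int) (hV : V.Nodup) :
    V.foldl (fun l v => l.erase v) l = eraseFirsts (fun y => V.contains y) l := by
  induction l generalizing V with
  | nil => simp [foldl_erase_nil, eraseFirsts]
  | cons x xs ih =>
    by_cases hx : x ∈ V
    · rw [foldl_erase_cons_mem V x xs hx]
      rw [ih (V.erase x) (hV.erase x)]
      simp only [eraseFirsts, List.contains_iff_mem, hx]
      refine eraseFirsts_congr _ _ (fun y => ?_) xs
      by_cases hy : y = x
      · subst hy; simp [List.Nodup.not_mem_erase hV]
      · simp [List.mem_erase_of_ne hy, hy]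
    · rw [foldl_erase_cons_not_mem V x xs hx, ih V hV]
      simp [eraseFirsts, hx]

-- parity arithmetic: the partner relation is symmetric for mn ∈ {0,1}
theorem pPartner_pred (mn a : Int) (hmn : mn = 0 ∨ mn = 1)
    (h : (PySem.Int.mod a 2 == mn) = false) : pPartner mn (a - 1) = a := by
  have e1 : PySem.Int.mod a 2 = a % 2 := PySem.Int.mod_eq_emod_of_pos (by norm_num)
  have e2 : PySem.Int.mod (a - 1) 2 = (a - 1) % 2 := PySem.Int.mod_eq_emod_of_pos (by norm_num)
  have h' : ¬ (a % 2 = mn) := by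
    intro hh; rw [e1] at h; simp [hh] at h
  have : (a - 1) % 2 = mn := by omega
  simp [pPartner, this]

-- the loop invariant: membership of y in the current list is still the original membership,
-- as long as y has not yet been reached (a ≤ y) or y never gets removed (pBad y = false)
def pvInv (L0 : List Int) (mn mx a : Int) (l : List Int) : Prop :=
  ∀ y : Int, (a ≤ y ∨ pBad L0 mn mx y = false) → (y ∈ l ↔ y ∈ L0)

theorem pyRemove_eq_erase (l : List Int) (x : Int) (hx : x ∈ l) : pyRemove l x = l.erase x := by
  simp [pyRemove, PySem.List.remove?_eq_some_erase l x hx]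

-- A's branch chain equals the unified step, for mn = 0 or mn = 1
theorem astep_eq (mn : Int) (hmn : mn = 0 ∨ mn = 1) (l : List Int) (i : Int) :
    (if mn == 1 && l.contains i then
      if l.contains (i + 1) && (PySem.Int.mod i 2 == 1) then l
      else if l.contains (i - 1) && (PySem.Int.mod i 2 == 0) then l
      else pyRemove l i
    else if mn == 0 && l.contains i then
      if l.contains (i + 1) && (PySem.Int.mod i 2 == 0) then l
      else if l.contains (i - 1) && (PySem.Int.mod i 2 == 1) then l
      else pyRemove l i
    else l)
    = (if l.contains i && !(l.contains (pPartner mn i)) then l.erase i else l) := by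
  have e1 : PySem.Int.mod i 2 = i % 2 := PySem.Int.mod_eq_emod_of_pos (by norm_num)
  have hpar : i % 2 = 0 ∨ i % 2 = 1 := Int.emod_two_eq_zero_or_one i
  by_cases hi : i ∈ l
  · have hrem := pyRemove_eq_erase l i hi
    rcases hmn with rfl | rfl <;> rcases hpar with hp | hp <;>
      simp [pPartner, hp, hi, hrem]
  · rcases hmn with rfl | rfl <;> simp [hi]

-- main induction over the range: A's stateful loop equals erasing each bad range value in order
theorem aLoop_eq (L0 : List Int) (mn mx : Int) (hmn : mn = 0 ∨ mn = 1) :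
    ∀ (n : Nat) (a : Int) (l : List Int), (mx + 1 - a).toNat = n → mn ≤ a →
      pvInv L0 mn mx a l →
      (PySem.List.pyRange a (mx + 1) 1).foldl (fun l i =>
        if mn == 1 && l.contains i then
          if l.contains (i + 1) && (PySem.Int.mod i 2 == 1) then l
          else if l.contains (i - 1) && (PySem.Int.mod i 2 == 0) then l
          else pyRemove l i
        else if mn == 0 && l.contains i then
          if l.contains (i + 1) && (PySem.Int.mod i 2 == 0) then l
          else if l.contains (i - 1) && (PySem.Int.mod i 2 == 1) then l
          else pyRemove l i
        else l) l
      = ((PySem.List.pyRange a (mx + 1) 1).filter (pBad L0 mn mx)).foldl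
          (fun l v => l.erase v) l := by
  intro n
  induction n with
  | zero =>
    intro a l hn ha _
    have hab : mx + 1 ≤ a := by omega
    rw [PySem.List.pyRange_one_eq_nil hab]
    rfl
  | succ n ih =>
    intro a l hn ha hinv
    have hab : a < mx + 1 := by omega
    rw [PySem.List.pyRange_one_cons hab]
    have hmem_a : a ∈ l ↔ a ∈ L0 := hinv a (Or.inl le_rfl)
    -- the partner's current membership equals its original membership whenever a ∈ L0
    have hpartner : a ∈ L0 → (pPartner mn a ∈ l ↔ pPartner mn a ∈ L0) := by
      intro haL0
      by_cases hp : (PySem.Int.mod a 2 == mn) = true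
      · have : pPartner mn a = a + 1 := by unfold pPartner; rw [hp]; simp
        rw [this]; exact hinv (a + 1) (Or.inl (by omega))
      · have hpf : (PySem.Int.mod a 2 == mn) = false := by
          simpa using hp
        have hpp : pPartner mn a = a - 1 := by unfold pPartner; rw [hpf]; simp
        rw [hpp]
        refine hinv (a - 1) (Or.inr ?_)
        have : pPartner mn (a - 1) = a := pPartner_pred mn a hmn hpf
        simp [pBad, this, haL0]
    -- step value
    simp only [List.foldl_cons]
    rw [astep_eq mn hmn l a]
    by_cases hbad : pBad L0 mn mx a = true
    · -- a is removed by both sides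
      have hpl : pPartner mn a ∉ L0 := by
        simp only [pBad, Bool.and_eq_true, Bool.not_eq_true', decide_eq_true_eq] at hbad
        simpa using hbad.2
      have hstep : (if l.contains a && !(l.contains (pPartner mn a)) then l.erase a else l)
          = l.erase a := by
        by_cases haL : a ∈ L0
        · have h1 : a ∈ l := hmem_a.mpr haL
          have h2 : pPartner mn a ∉ l := fun h => hpl ((hpartner haL).mp h)
          simp [h1, h2]
        · have h1 : a ∉ l := fun h => haL (hmem_a.mp h)
          simp [h1, List.erase_of_not_mem h1]
      rw [hstep]
      have hfe : (a :: PySem.List.pyRange (a+1) (mx+1) 1).filter (pBad L0 mn mx)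
          = a :: (PySem.List.pyRange (a+1) (mx+1) 1).filter (pBad L0 mn mx) := by
        simp [hbad]
      rw [hfe]
      simp only [List.foldl_cons]
      refine ih (a + 1) (l.erase a) (by omega) (by omega) ?_
      intro y hy
      have hya : y ≠ a := by
        rcases hy with h | h
        · omega
        · intro rfl_; subst rfl_; rw [h] at hbad; cases hbad
      rw [List.mem_erase_of_ne hya]
      refine hinv y ?_
      rcases hy with h | h
      · exact Or.inl (by omega)
      · exact Or.inr h
    · -- a stays: both sides leave l unchanged
      have hbadf : pBad L0 mn mx a = false := by simpa using hbad
      have hstep : (if l.contains a && !(l.contains (pPartner mn a)) then l.erase a else l)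
          = l := by
        by_cases haL : a ∈ L0
        · have hpl : pPartner mn a ∈ L0 := by
            by_contra hno
            have : pBad L0 mn mx a = true := by
              simp [pBad, hno]; omega
            rw [this] at hbadf; cases hbadf
          have h2 : pPartner mn a ∈ l := (hpartner haL).mpr hpl
          simp [h2]
        · have h1 : a ∉ l := fun h => haL (hmem_a.mp h)
          simp [h1]
      rw [hstep]
      have hfe : (a :: PySem.List.pyRange (a+1) (mx+1) 1).filter (pBad L0 mn mx)
          = (PySem.List.pyRange (a+1) (mx+1) 1).filter (pBad L0 mn mx) := by
        simp [hbadf]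
      rw [hfe]
      refine ih (a + 1) l (by omega) (by omega) ?_
      intro y hy
      refine hinv y ?_
      rcases hy with h | h
      · exact Or.inl (by omega)
      · exact Or.inr h

-- B's element pass computes eraseFirsts of the pending bad values
theorem bLoop_eq (L0 : List Int) (mn mx : Int) :
    ∀ (l : List Int) (acc : List Int) (rem : PySem.Set Int),
      (l.foldl (fun (st : List Int × PySem.Set Int) x =>
        let partner := if PySem.Int.mod x 2 == mn then x + 1 else x - 1
        if decide (mn ≤ x ∧ x ≤ mx) && !(PySem.Set.contains (PySem.Set.ofList L0) partner)
             && !(PySem.Set.contains st.2 x)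
        then (st.1, PySem.Set.add st.2 x)
        else (st.1 ++ [x], st.2)) (acc, rem)).1
      = acc ++ eraseFirsts (fun x => pBad L0 mn mx x && !(PySem.Set.contains rem x)) l := by
  intro l
  induction l with
  | nil => intro acc rem; simp [eraseFirsts]
  | cons x xs ih =>
    intro acc rem
    have hpres : ∀ y : Int, PySem.Set.contains (PySem.Set.ofList L0) y = L0.contains y := by
      intro y
      simp [PySem.Set.mem_ofList]
    have hcond : (decide (mn ≤ x ∧ x ≤ mx)
          && !(PySem.Set.contains (PySem.Set.ofList L0)
                (if PySem.Int.mod x 2 == mn then x + 1 else x - 1))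
          && !(PySem.Set.contains rem x))
        = (pBad L0 mn mx x && !(PySem.Set.contains rem x)) := by
      rw [hpres]; rfl
    simp only [List.foldl_cons]
    by_cases hc : (pBad L0 mn mx x && !(PySem.Set.contains rem x)) = true
    · rw [show (if (decide (mn ≤ x ∧ x ≤ mx)
          && !(PySem.Set.contains (PySem.Set.ofList L0)
                (if PySem.Int.mod x 2 == mn then x + 1 else x - 1))
          && !(PySem.Set.contains rem x)) = true
          then ((acc, rem).1, PySem.Set.add (acc, rem).2 x)
          else ((acc, rem).1 ++ [x], (acc, rem).2))
          = (acc, PySem.Set.add rem x) by rw [hcond, hc]; simp]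
      rw [ih acc (PySem.Set.add rem x)]
      have hx : (fun y => pBad L0 mn mx y && !(PySem.Set.contains (PySem.Set.add rem x) y))
          = (fun y => (pBad L0 mn mx y && !(PySem.Set.contains rem y)) && !(y == x)) := by
        funext y
        have : PySem.Set.contains (PySem.Set.add rem x) y
            = (PySem.Set.contains rem y || y == x) := by
          by_cases hxy : y = x <;> simp [PySem.Set.mem_add, hxy]
        rw [this]
        cases pBad L0 mn mx y <;> cases PySem.Set.contains rem y <;> cases hy : (y == x) <;> simp
      rw [hx, eraseFirsts_cons_pos _ _ _ hc]
    · have hcf : (pBad L0 mn mx x && !(PySem.Set.contains rem x)) = false := by simpa using hc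
      rw [show (if (decide (mn ≤ x ∧ x ≤ mx)
          && !(PySem.Set.contains (PySem.Set.ofList L0)
                (if PySem.Int.mod x 2 == mn then x + 1 else x - 1))
          && !(PySem.Set.contains rem x)) = true
          then ((acc, rem).1, PySem.Set.add (acc, rem).2 x)
          else ((acc, rem).1 ++ [x], (acc, rem).2))
          = (acc ++ [x], rem) by rw [hcond, hcf]; simp]
      rw [ih (acc ++ [x]) rem, eraseFirsts_cons_neg _ _ _ hcf]
      simp

theorem foldl_id (R : List Int) (l : List Int)
    (f : List Int → Int → List Int) (hf : ∀ l i, f l i = l) : R.foldl f l = l := by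
  induction R generalizing l with
  | nil => rfl
  | cons r R ih => rw [List.foldl_cons, hf]; exact ih l

-- ===== VERDICT (by name: the statement is the Claim_ definition above) =====
theorem CutNonPair_spec : Claim_equal_CutNonPair := by
  intro myList minBound maxBound _
  unfold Spec_CutNonPair CutNonPair CutNonPair_alt
  by_cases hmn : minBound = 0 ∨ minBound = 1
  · have hne : ¬ (minBound ≠ 0 ∧ minBound ≠ 1) := by tauto
    rw [if_neg hne]
    rw [aLoop_eq myList minBound maxBound hmn ((maxBound + 1 - minBound).toNat) minBound myList
        rfl le_rfl (fun y _ => Iff.rfl)]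
    rw [bLoop_eq myList minBound maxBound myList [] PySem.Set.empty]
    have hnd : ((PySem.List.pyRange minBound (maxBound + 1) 1).filter
        (pBad myList minBound maxBound)).Nodup :=
      (PySem.List.nodup_pyRange_one ..).filter _
    rw [foldl_erase_eq_eraseFirsts myList _ hnd]
    rw [List.nil_append]
    refine eraseFirsts_congr _ _ (fun y => ?_) myList
    have hrem : PySem.Set.contains PySem.Set.empty y = false := by
      simp [PySem.Set.empty]
    rw [hrem]
    simp only [Bool.not_false, Bool.and_true]
    by_cases hb : pBad myList minBound maxBound y = true
    · have hy : minBound ≤ y ∧ y < maxBound + 1 := by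
        simp only [pBad, Bool.and_eq_true, decide_eq_true_eq] at hb
        exact ⟨hb.1.1, by omega⟩
      simp [hb, hy]
    · simp [Bool.eq_false_iff.mpr hb]
  · have hmn' := not_or.mp hmn
    rw [if_pos hmn']
    refine foldl_id _ _ _ (fun l i => ?_)
    have h1 : (minBound == 1) = false := by simp [hmn'.2]
    have h0 : (minBound == 0) = false := by simp [hmn'.1]
    simp [h0, h1]
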